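-- pv_equiv track=rewrite | github.com/Kanapud/Numeri_Vigenere_cipher | Encrypted+C.py | encrypt_coordinates
-- ===== SOURCE A (Python) =====
-- def vigenere_cipher(text, key):
--     encrypted_text = ""
--     key_length = len(key)
--     for i, char in enumerate(text):
--         key_char = key[i % key_length]
--         if char.isdigit():
--             encrypted_char = str((int(char) + int(key_char)) % 10)
--         else:
--             encrypted_char = char
--         encrypted_text += encrypted_char
--     return encrypted_text
--
-- def encrypt_coordinates(coord, key, caesar_table):
--     if '.' in coord:
--         integer_part, decimal_part = coord.split('.')
--         encrypted_integer_part = vigenere_cipher(integer_part, key)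
--         encrypted_decimal_part = ''.join(str(caesar_table[int(digit)]) for digit in decimal_part)
--         encrypted_coord = encrypted_integer_part + '.' + encrypted_decimal_part
--     else:
--         encrypted_coord = vigenere_cipher(coord, key)
--     return encrypted_coord
-- ===== SOURCE B (Python) =====
-- def encrypt_coordinates(coord, key, caesar_table):
--     # one linear scan: vigenere before the first '.', caesar table after it
--     out = []
--     i = 0
--     after_decimal = False
--     for c in coord:
--         if after_decimal:
--             out.append(str(caesar_table[int(c)]))
--         elif c == '.':
--             out.append('.')
--             after_decimal = True
--         elif c.isdigit():
--             out.append(str((int(c) + int(key[i % len(key)])) % 10))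
--             i += 1
--         else:
--             out.append(c)
--             i += 1
--     return ''.join(out)
-- ===== Notes on version B (the rewrite author's own statement) =====
-- stated objective: alternative
-- what changed: Replaces A's split-at-dot followed by two separate passes (vigenere_cipher over the integer part, a join over the decimal part) with one linear scan over coord carrying a position counter and an after-decimal flag, building the output via a list and ''.join.
import Mathlib
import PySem

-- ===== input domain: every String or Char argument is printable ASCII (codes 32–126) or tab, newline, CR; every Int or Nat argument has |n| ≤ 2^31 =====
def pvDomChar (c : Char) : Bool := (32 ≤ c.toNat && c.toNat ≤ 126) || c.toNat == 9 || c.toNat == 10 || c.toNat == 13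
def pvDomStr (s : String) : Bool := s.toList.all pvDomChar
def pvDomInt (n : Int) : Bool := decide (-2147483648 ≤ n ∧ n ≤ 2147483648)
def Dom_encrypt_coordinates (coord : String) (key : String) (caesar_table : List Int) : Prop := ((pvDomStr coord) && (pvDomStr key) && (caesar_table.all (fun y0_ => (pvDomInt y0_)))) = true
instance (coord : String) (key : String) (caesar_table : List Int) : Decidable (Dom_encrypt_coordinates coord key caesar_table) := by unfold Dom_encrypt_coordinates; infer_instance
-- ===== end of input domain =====

-- B re-implements A's split-then-two-passes as one linear left-to-right scan with a
-- position counter and an after-decimal flag (objective: alternative decomposition, same cost).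

-- ===== PORT A =====
-- vigenere_cipher's loop: for i, char in enumerate(text): encrypted_text += …
-- key[i % key_length]: under Pre_ the key is nonempty whenever the loop runs, so the Python
-- index i % len(key) is the Nat mod used here (ZeroDivisionError on empty key is outside Pre_);
-- int(c) for a digit character c is c.toNat - 48 (Pre_ guarantees the key char is a digit).
def pvVigGo (ks : List Char) : List Char → Nat → List Char → List Char
  | [], _, acc => acc
  | c :: rest, i, acc =>
      let kc := ks.getD (i % ks.length) '0'
      let ec : List Char :=
        if c.isDigit then (PySem.Int.toStr ((((c.toNat : Int) - 48) + ((kc.toNat : Int) - 48)) % 10)).toList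
        else [c]
      pvVigGo ks rest (i + 1) (acc ++ ec)

-- str(caesar_table[int(digit)]): Pre_ guarantees digit is '0'..'9' and the index is in range
-- (IndexError / ValueError outside Pre_), so list.getD with a junk default is exact there.
def pvCaesarStr (table : List Int) (c : Char) : List Char :=
  (PySem.Int.toStr (table.getD (c.toNat - 48) 0)).toList

-- coord.split('.') with at most one '.' (Pre_): takeWhile / tail-of-dropWhile; two or more
-- dots make Python's two-target unpacking raise ValueError, which Pre_ excludes.
def encrypt_coordinates (coord : String) (key : String) (caesar_table : List Int) : String :=
  let cs := coord.toList
  if cs.contains '.' then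
    let integer_part := cs.takeWhile (· ≠ '.')
    let decimal_part := (cs.dropWhile (· ≠ '.')).tail
    String.ofList (pvVigGo key.toList integer_part 0 [] ++ ['.'] ++
      (decimal_part.map (pvCaesarStr caesar_table)).flatten)   -- ''.join(generator)
  else
    String.ofList (pvVigGo key.toList cs 0 [])

-- ===== PORT B =====
-- single scan of Source B: i = position counter before the dot, after = after_decimal flag;
-- the pieces list + ''.join is realised by building the character list front to back.
def pvScan (ks : List Char) (table : List Int) : List Char → Nat → Bool → List Char
  | [], _, _ => []
  | c :: rest, i, true =>
      (PySem.Int.toStr (table.getD (c.toNat - 48) 0)).toList ++ pvScan ks table rest i true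
  | c :: rest, i, false =>
      if c = '.' then
        '.' :: pvScan ks table rest i true
      else if c.isDigit then
        (PySem.Int.toStr ((((c.toNat : Int) - 48) + (((ks.getD (i % ks.length) '0').toNat : Int) - 48)) % 10)).toList
          ++ pvScan ks table rest (i + 1) false
      else
        c :: pvScan ks table rest (i + 1) false

def encrypt_coordinates_alt (coord : String) (key : String) (caesar_table : List Int) : String :=
  String.ofList (pvScan key.toList caesar_table coord.toList 0 false)

-- ===== PRECONDITION & SPEC =====
-- Pre_ = exactly the inputs on which Python A returns: at most one '.', a nonempty key when the
-- vigenere loop runs (else ZeroDivisionError), a digit key char at every position paired with a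
-- digit of the integer part (else ValueError from int), and every char after the '.' a digit
-- indexing inside caesar_table (else ValueError / IndexError).
def pvIntPart (cs : List Char) : List Char := if cs.contains '.' then cs.takeWhile (· ≠ '.') else cs
def pvDecPart (cs : List Char) : List Char := if cs.contains '.' then (cs.dropWhile (· ≠ '.')).tail else []

def Pre_encrypt_coordinates (coord : String) (key : String) (caesar_table : List Int) : Prop :=
  coord.toList.count '.' ≤ 1 ∧
  (pvIntPart coord.toList ≠ [] → key.toList ≠ []) ∧
  ((pvIntPart coord.toList).zipIdx.all
    (fun p => !p.1.isDigit || (key.toList.getD (p.2 % key.toList.length) '0').isDigit)) = true ∧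
  ((pvDecPart coord.toList).all
    (fun c => c.isDigit && decide (c.toNat - 48 < caesar_table.length))) = true
instance (coord : String) (key : String) (caesar_table : List Int) : Decidable (Pre_encrypt_coordinates coord key caesar_table) := by unfold Pre_encrypt_coordinates; infer_instance

def pvWitness_encrypt_coordinates : String × String × List Int :=
  ("12.3", "45", [3, 1, 4, 1, 5, 9, 2, 6, 5, 3])

def Spec_encrypt_coordinates (coord : String) (key : String) (caesar_table : List Int) (out : String) : Prop := out = encrypt_coordinates_alt coord key caesar_table
instance (coord : String) (key : String) (caesar_table : List Int) (out : String) : Decidable (Spec_encrypt_coordinates coord key caesar_table out) := by unfold Spec_encrypt_coordinates; infer_instance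

-- ===== CLAIM (what is proved, stated in full; the proofs are below) =====
def Claim_equal_encrypt_coordinates : Prop := ∀ (coord : String) (key : String) (caesar_table : List Int), Dom_encrypt_coordinates coord key caesar_table → Pre_encrypt_coordinates coord key caesar_table → Spec_encrypt_coordinates coord key caesar_table (encrypt_coordinates coord key caesar_table)

-- ===== LEMMAS AND PROOFS =====

-- accumulator of the A-side loop factors out
theorem pvVigGo_acc (ks : List Char) (l : List Char) :
    ∀ (i : Nat) (acc : List Char), pvVigGo ks l i acc = acc ++ pvVigGo ks l i [] := by
  induction l with
  | nil => intro i acc; simp [pvVigGo]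
  | cons c rest ih =>
      intro i acc
      simp only [pvVigGo]
      rw [ih (i + 1), ih (i + 1) ([] ++ _)]
      simp [List.append_assoc]

-- the scan over a dot-free prefix followed by l is A's vigenere loop followed by the scan of l
theorem pvScan_no_dot (ks : List Char) (table : List Int) (ip : List Char) (hnd : '.' ∉ ip) :
    ∀ (i : Nat) (l : List Char),
      pvScan ks table (ip ++ l) i false = pvVigGo ks ip i [] ++ pvScan ks table l (ip.length + i) false := by
  induction ip with
  | nil => intro i l; simp [pvVigGo]
  | cons c rest ih =>
      intro i l
      have hc : c ≠ '.' := by intro h; exact hnd (by simp [h])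
      have hrest : '.' ∉ rest := fun h => hnd (List.mem_cons_of_mem _ h)
      have hacc : pvVigGo ks (c :: rest) i [] =
          (if c.isDigit then (PySem.Int.toStr ((((c.toNat : Int) - 48) + (((ks.getD (i % ks.length) '0').toNat : Int) - 48)) % 10)).toList else [c])
            ++ pvVigGo ks rest (i + 1) [] := by
        simp only [pvVigGo]
        rw [pvVigGo_acc]
        simp
      have hidx : rest.length + (i + 1) = rest.length + 1 + i := by omega
      simp only [List.cons_append, pvScan, if_neg hc]
      by_cases hd : c.isDigit
      · rw [if_pos hd, ih hrest (i + 1) l, hacc, if_pos hd, hidx]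
        simp [List.append_assoc, List.length_cons]
      · rw [if_neg hd, ih hrest (i + 1) l, hacc, if_neg hd, hidx]
        simp [List.length_cons]

-- the scan after the dot is A's join over the caesar table
theorem pvScan_after (ks : List Char) (table : List Int) (dp : List Char) :
    ∀ (i : Nat), pvScan ks table dp i true = (dp.map (pvCaesarStr table)).flatten := by
  induction dp with
  | nil => intro i; simp [pvScan]
  | cons c rest ih => intro i; simp [pvScan, pvCaesarStr, ih]

-- a list containing '.' splits as takeWhile ++ '.' :: tail-of-dropWhile
theorem split_at_dot (cs : List Char) (h : '.' ∈ cs) :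
    cs = cs.takeWhile (· ≠ '.') ++ '.' :: (cs.dropWhile (· ≠ '.')).tail := by
  induction cs with
  | nil => simp at h
  | cons c rest ih =>
      by_cases hc : c = '.'
      · subst hc; simp
      · have hr : '.' ∈ rest := by
          rcases List.mem_cons.mp h with h1 | h1
          · exact absurd h1.symm hc
          · exact h1
        have := ih hr
        rw [List.takeWhile_cons_of_pos (by simp [hc]), List.dropWhile_cons_of_pos (by simp [hc])]
        simpa using this

theorem not_dot_mem_takeWhile (cs : List Char) : '.' ∉ cs.takeWhile (· ≠ '.') := by
  intro h
  have := List.mem_takeWhile_imp h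
  simp at this

-- ===== VERDICT (by name: the statement is the Claim_ definition above) =====
theorem encrypt_coordinates_spec : Claim_equal_encrypt_coordinates := by
  intro coord key caesar_table _ _
  unfold Spec_encrypt_coordinates encrypt_coordinates encrypt_coordinates_alt
  by_cases h : coord.toList.contains '.'
  · rw [if_pos h]
    have hm : '.' ∈ coord.toList := by simpa using h
    conv_rhs => rw [split_at_dot coord.toList hm]
    rw [pvScan_no_dot _ _ _ (not_dot_mem_takeWhile coord.toList)]
    simp only [pvScan]
    rw [pvScan_after]
    simp [List.append_assoc]
  · rw [if_neg h]
    have hnm : '.' ∉ coord.toList := by simpa using h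
    have : coord.toList = coord.toList ++ [] := by simp
    conv_rhs => rw [this]
    rw [pvScan_no_dot _ _ _ hnm]
    simp [pvScan]
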